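-- pv_equiv track=rewrite | github.com/mpirnat/chiisai-django | chiisai/shortener/base.py | base_decode
-- ===== SOURCE A (Python) =====
-- base62 = "0123456789ABCDEFGHIJKLMNOPQRSTUVWXYZabcdefghijklmnopqrstuvwxyz"
--
-- def base_decode(string_: str, alphabet: str = base62) -> int:
--     """
--     Decode a Base X string into a base10 integer.
--     """
--     base = len(alphabet)
--     length = len(string_)
--     integer = 0
--
--     for i, char in enumerate(string_):
--         power = length - (i + 1)
--         integer += alphabet.index(char) * (base**power)
--
--     return integer
-- ===== SOURCE B (Python) =====
-- base62 = "0123456789ABCDEFGHIJKLMNOPQRSTUVWXYZabcdefghijklmnopqrstuvwxyz"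
--
-- def base_decode(string_: str, alphabet: str = base62) -> int:
--     """
--     Decode a Base X string into a base10 integer.
--     """
--     # first-occurrence char -> index map, built once
--     idx = {}
--     for i, char in enumerate(alphabet):
--         if char not in idx:
--             idx[char] = i
--     # Horner's method: no powers, no repeated alphabet scans
--     base = len(alphabet)
--     integer = 0
--     for char in string_:
--         integer = integer * base + idx[char]
--     return integer
-- ===== Notes on version B (the rewrite author's own statement) =====
-- stated objective: faster
-- what changed: Replaces per-character alphabet.index scans and base**power exponentiations with a precomputed first-occurrence char->index dict and Horner's method in one pass.
import Mathlib
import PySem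

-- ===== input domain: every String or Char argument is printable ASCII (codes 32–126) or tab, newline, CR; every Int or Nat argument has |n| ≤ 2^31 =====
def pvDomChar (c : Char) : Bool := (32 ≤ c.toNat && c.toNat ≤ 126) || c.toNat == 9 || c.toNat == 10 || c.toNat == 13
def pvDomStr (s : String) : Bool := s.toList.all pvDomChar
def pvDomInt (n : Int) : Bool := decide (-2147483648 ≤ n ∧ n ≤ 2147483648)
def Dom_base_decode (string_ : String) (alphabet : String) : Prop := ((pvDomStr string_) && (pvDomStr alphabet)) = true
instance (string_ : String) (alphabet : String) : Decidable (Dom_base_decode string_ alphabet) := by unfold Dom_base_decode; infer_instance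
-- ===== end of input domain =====

-- B replaces A's per-character alphabet.index scan and base**power with a precomputed
-- first-occurrence char→index dict and Horner's method (objective: faster, one pass).

-- ===== PORT A =====
-- alphabet.index(char) raises ValueError when char ∉ alphabet; Pre_ excludes those inputs,
-- so the .getD 0 totalisation below is never reached under Pre_. The exponent
-- length - (i+1) is ≥ 0 for every i produced by enumerate, so ** is ^ on Nat exponent.
def base_decode (string_ : String) (alphabet : String) : Int :=
  let base : Int := alphabet.toList.length
  let length : Int := string_.toList.length
  (PySem.List.enumerate string_.toList).foldl
    (fun integer ic =>
      let power : Int := length - (ic.1 + 1)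
      integer + (((PySem.List.index? alphabet.toList ic.2).getD 0 : Nat) : Int) * base ^ power.toNat)
    0

-- ===== PORT B =====
-- idx[char] raises KeyError when char ∉ alphabet; Pre_ excludes those inputs, so the
-- .getD … 0 totalisation below is never reached under Pre_.
def base_decode_alt (string_ : String) (alphabet : String) : Int :=
  let idx : PySem.Dict Char Int :=
    (PySem.List.enumerate alphabet.toList).foldl
      (fun d ic => if d.contains ic.2 then d else d.insert ic.2 ic.1) PySem.Dict.empty
  let base : Int := alphabet.toList.length
  string_.toList.foldl (fun integer c => integer * base + idx.getD c 0) 0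

-- ===== PRECONDITION & SPEC =====
-- Pre_ excludes exactly the inputs where A raises ValueError (a character of string_
-- not present in alphabet); B raises KeyError there too.
def Pre_base_decode (string_ : String) (alphabet : String) : Prop :=
  (string_.toList.all (fun c => alphabet.toList.contains c)) = true
instance (string_ : String) (alphabet : String) : Decidable (Pre_base_decode string_ alphabet) := by
  unfold Pre_base_decode; infer_instance
def pvWitness_base_decode : String × String := ("ba", "abc")

def Spec_base_decode (string_ : String) (alphabet : String) (out : Int) : Prop := out = base_decode_alt string_ alphabet
instance (string_ : String) (alphabet : String) (out : Int) : Decidable (Spec_base_decode string_ alphabet out) := by unfold Spec_base_decode; infer_instance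

-- ===== CLAIM (what is proved, stated in full; the proofs are below) =====
def Claim_equal_base_decode : Prop := ∀ (string_ : String) (alphabet : String), Dom_base_decode string_ alphabet → Pre_base_decode string_ alphabet → Spec_base_decode string_ alphabet (base_decode string_ alphabet)

-- ===== LEMMAS AND PROOFS =====

-- index of c in alphabet, totalised by 0 (both ports reduce to this)
def pvF (alphabet : String) (c : Char) : Int :=
  (((PySem.List.index? alphabet.toList c).getD 0 : Nat) : Int)

-- positional value Σ pvF(cᵢ)·baseᵉ, e decreasing to 0
def pvPoly (al : String) : List Char → Int
  | [] => 0
  | c :: cs => pvF al c * (al.toList.length : Int) ^ cs.length + pvPoly al cs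

theorem pv_dict_get (l : List Char) (s : Int) (d : PySem.Dict Char Int) (c : Char) :
    ((PySem.List.enumerate l s).foldl
      (fun d ic => if d.contains ic.2 then d else d.insert ic.2 ic.1) d).get? c
    = (d.get? c).or ((PySem.List.index? l c).map (fun k => s + (k : Int))) := by
  induction l generalizing s d with
  | nil => simp [PySem.List.enumerate_nil, PySem.List.index?_eq_idxOf?]
  | cons x xs ih =>
    rw [PySem.List.enumerate_cons]
    simp only [List.foldl_cons]
    by_cases hx : c = x
    · subst hx
      cases hcont : d.contains c with
      | false =>
        rw [if_neg (by simp)]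
        rw [ih]
        have hd : d.get? c = none := by
          rw [PySem.Dict.get?_eq_none_iff_contains]; exact hcont
        rw [PySem.Dict.get?_insert_self, PySem.List.index?_cons_self, hd]
        simp
      | true =>
        rw [if_pos rfl]
        rw [ih]
        have hs : (d.get? c).isSome := by
          rw [← PySem.Dict.contains_eq_isSome_get?]; exact hcont
        cases h : d.get? c with
        | none => rw [h] at hs; simp at hs
        | some v => simp
    · have hxc : x ≠ c := fun h => hx h.symm
      rw [PySem.List.index?_cons_of_ne (h := hxc)]
      cases hcont : d.contains x with
      | false =>
        rw [if_neg (by simp)]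
        rw [ih]; simp only [PySem.Dict.get?_insert, if_neg hx]
        congr 1
        cases PySem.List.index? xs c with
        | none => rfl
        | some k => simp; omega
      | true =>
        rw [if_pos rfl]
        rw [ih]
        congr 1
        cases PySem.List.index? xs c with
        | none => rfl
        | some k => simp; omega

theorem pv_getD_idx (al : String) (c : Char) :
    (((PySem.List.enumerate al.toList 0).foldl
      (fun d ic => if d.contains ic.2 then d else d.insert ic.2 ic.1)
      PySem.Dict.empty).getD c 0) = pvF al c := by
  rw [PySem.Dict.getD_eq_get?_getD, pv_dict_get]
  rw [PySem.Dict.get?_empty]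
  unfold pvF
  cases PySem.List.index? al.toList c with
  | none => rfl
  | some k => simp

theorem pv_A_fold (al : String) (cs : List Char) (i : Int) (acc : Int) (L : Int)
    (h : i + cs.length = L) :
    (PySem.List.enumerate cs i).foldl
      (fun integer ic =>
        integer + (((PySem.List.index? al.toList ic.2).getD 0 : Nat) : Int)
          * (al.toList.length : Int) ^ (L - (ic.1 + 1)).toNat)
      acc
    = acc + pvPoly al cs := by
  induction cs generalizing i acc with
  | nil => simp [PySem.List.enumerate_nil, pvPoly]
  | cons c cs ih =>
    rw [PySem.List.enumerate_cons]
    simp only [List.foldl_cons]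
    have h' : (i + 1) + (cs.length : Int) = L := by simp only [List.length_cons] at h; push_cast at h; omega
    rw [ih (i + 1) _ h']
    have hp : L - (i + 1) = (cs.length : Int) := by simp only [List.length_cons] at h; push_cast at h; omega
    rw [hp, Int.toNat_natCast]
    simp only [pvPoly, pvF]
    ring

theorem pv_B_fold (al : String) (cs : List Char) (acc : Int) :
    cs.foldl (fun integer c => integer * (al.toList.length : Int) + pvF al c) acc
    = acc * (al.toList.length : Int) ^ cs.length + pvPoly al cs := by
  induction cs generalizing acc with
  | nil => simp [pvPoly]
  | cons c cs ih =>
    simp only [List.foldl_cons]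
    rw [ih]
    simp only [pvPoly, List.length_cons]
    ring

theorem pv_alt_eq (s al : String) :
    base_decode_alt s al = pvPoly al s.toList := by
  unfold base_decode_alt
  simp only []
  have hfun : (fun (integer : Int) (c : Char) =>
      integer * (al.toList.length : Int) +
        ((PySem.List.enumerate al.toList 0).foldl
          (fun d ic => if d.contains ic.2 then d else d.insert ic.2 ic.1)
          PySem.Dict.empty).getD c 0)
      = fun integer c => integer * (al.toList.length : Int) + pvF al c := by
    funext integer c; rw [pv_getD_idx]
  rw [hfun, pv_B_fold]
  simp

-- ===== VERDICT (by name: the statement is the Claim_ definition above) =====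
theorem base_decode_spec : Claim_equal_base_decode := by
  intro s al _ _
  unfold Spec_base_decode
  rw [pv_alt_eq]
  have h := pv_A_fold al s.toList 0 0 s.toList.length (by simp)
  rw [zero_add] at h
  exact h
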